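-- pv_equiv track=rewrite | github.com/tpogden/advent-2023 | src/advent-2023/01.py | find_first_substr_in_str
-- ===== SOURCE A (Python) =====
-- def find_first_substr_in_str(str_to_find, substrs):
--     idx_found = 1000000  # assume no line longer than this
--     substr_found = None
--     for ss in substrs:
--         idx = str_to_find.find(ss)
--         if idx != -1 and idx < idx_found:
--             idx_found = idx
--             substr_found = ss
--     if substr_found is not None:
--         return substr_found, idx_found
--     else:
--         return None, None
-- ===== SOURCE B (Python) =====
-- def find_first_substr_in_str(str_to_find, substrs):
--     # Scan positions left to right and return the first substring match,
--     # trying the substrings in list order at each position.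
--     for i in range(len(str_to_find) + 1):
--         for ss in substrs:
--             if str_to_find.startswith(ss, i):
--                 return ss, i
--     return None, None
-- ===== Notes on version B (the rewrite author's own statement) =====
-- stated objective: faster
-- what changed: Instead of computing each substring's full find-index and keeping a running minimum, B scans string positions left to right and returns at the first position where some substring (in list order) starts; Pre_ excludes strings of length >= 1000000, which A explicitly assumes away ('assume no line longer than this') and where its sentinel silently drops any match at index >= 1000000 (e.g. on ('b'*1000000+'a', ['a']) A returns (None, None), B returns ('a', 1000000)).
import Mathlib
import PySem

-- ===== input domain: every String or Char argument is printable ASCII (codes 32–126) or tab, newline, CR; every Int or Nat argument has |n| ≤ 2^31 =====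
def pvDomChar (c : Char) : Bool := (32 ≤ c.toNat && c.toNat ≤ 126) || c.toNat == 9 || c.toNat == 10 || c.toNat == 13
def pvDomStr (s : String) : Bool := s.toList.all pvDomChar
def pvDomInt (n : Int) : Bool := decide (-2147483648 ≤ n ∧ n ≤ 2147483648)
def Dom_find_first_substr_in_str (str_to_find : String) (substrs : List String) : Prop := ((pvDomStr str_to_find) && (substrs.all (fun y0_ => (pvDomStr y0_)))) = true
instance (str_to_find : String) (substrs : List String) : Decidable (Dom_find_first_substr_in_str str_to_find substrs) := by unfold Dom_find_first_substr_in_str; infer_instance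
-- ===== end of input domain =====

-- B scans string positions left to right and returns on the first hit, instead of
-- A's running minimum over each substring's find-index; equivalence is claimed for
-- strings shorter than 1000000 characters (A's own stated assumption).

-- ===== PORT A =====
-- the loop body: idx = str_to_find.find(ss); if idx != -1 and idx < idx_found: update
-- (the local 'idx' is written out inline)
def ffsAStep (s : List Char) (st : Int × Option String) (ss : String) : Int × Option String :=
  if PySem.Chars.find s ss.toList ≠ -1 ∧ PySem.Chars.find s ss.toList < st.1 then
    (PySem.Chars.find s ss.toList, some ss)
  else st

def find_first_substr_in_str (str_to_find : String) (substrs : List String) : Option String × Option Int :=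
  let st := substrs.foldl (ffsAStep str_to_find.toList) (1000000, none)
  match st.2 with
  | some ss => (some ss, some st.1)
  | none => (none, none)

-- ===== PORT B =====
-- inner loop: 'for ss in substrs: if str_to_find.startswith(ss, i): return ss, i'
-- (str.startswith(ss, i) with 0 ≤ i ≤ len(s) is exactly 'ss is a prefix of s[i:]')
def ffsBInner (s : List Char) (i : Nat) : List String → Option (String × Nat)
  | [] => none
  | ss :: rest =>
      if PySem.Chars.startswith (s.drop i) ss.toList then some (ss, i) else ffsBInner s i rest

-- outer loop over the positions 'for i in range(len(str_to_find) + 1)'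
def ffsBScan (s : List Char) (substrs : List String) : List Nat → Option String × Option Int
  | [] => (none, none)
  | i :: rest =>
      match ffsBInner s i substrs with
      | some (ss, j) => (some ss, some (j : Int))
      | none => ffsBScan s substrs rest

def find_first_substr_in_str_alt (str_to_find : String) (substrs : List String) : Option String × Option Int :=
  ffsBScan str_to_find.toList substrs (List.range (str_to_find.toList.length + 1))

-- ===== PRECONDITION & SPEC =====
-- Pre_ excludes strings of length ≥ 1000000, which A explicitly assumes away
-- ('# assume no line longer than this'): there A's sentinel silently drops any
-- match first occurring at index ≥ 1000000 and returns (None, None), while B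
-- reports the match.
def Pre_find_first_substr_in_str (str_to_find : String) (substrs : List String) : Prop :=
  str_to_find.toList.length < 1000000
instance (str_to_find : String) (substrs : List String) : Decidable (Pre_find_first_substr_in_str str_to_find substrs) := by unfold Pre_find_first_substr_in_str; infer_instance
def pvWitness_find_first_substr_in_str : String × List String := ("one2three", ["two", "three", "one"])
def Spec_find_first_substr_in_str (str_to_find : String) (substrs : List String) (out : Option String × Option Int) : Prop := out = find_first_substr_in_str_alt str_to_find substrs
instance (str_to_find : String) (substrs : List String) (out : Option String × Option Int) : Decidable (Spec_find_first_substr_in_str str_to_find substrs out) := by unfold Spec_find_first_substr_in_str; infer_instance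

-- ===== CLAIM (what is proved, stated in full; the proofs are below) =====
def Claim_equal_find_first_substr_in_str : Prop := ∀ (str_to_find : String) (substrs : List String), Dom_find_first_substr_in_str str_to_find substrs → Pre_find_first_substr_in_str str_to_find substrs → Spec_find_first_substr_in_str str_to_find substrs (find_first_substr_in_str str_to_find substrs)

-- ===== LEMMAS AND PROOFS =====

-- `bestOf s t l`: the (index, substring) pair A's fold ends with when started at threshold t,
-- as a structural recursion (none = the state is left untouched).
def bestOf (s : List Char) (t : Int) : List String → Option (Int × String)
  | [] => none
  | ss :: rest =>
      if PySem.Chars.find s ss.toList ≠ -1 ∧ PySem.Chars.find s ss.toList < t then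
        match bestOf s (PySem.Chars.find s ss.toList) rest with
        | some r => some r
        | none => some (PySem.Chars.find s ss.toList, ss)
      else bestOf s t rest

theorem foldA_char (s : List Char) (l : List String) (t : Int) (o : Option String) :
    l.foldl (ffsAStep s) (t, o) =
      match bestOf s t l with
      | some (j, ss) => (j, some ss)
      | none => (t, o) := by
  induction l generalizing t o with
  | nil => simp [bestOf]
  | cons ss rest ih =>
      simp only [List.foldl_cons, ffsAStep, bestOf]
      by_cases h : PySem.Chars.find s ss.toList ≠ -1 ∧ PySem.Chars.find s ss.toList < t
      · rw [if_pos h, if_pos h, ih]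
        cases hb : bestOf s (PySem.Chars.find s ss.toList) rest with
        | none => rfl
        | some r => cases r; rfl
      · rw [if_neg h, if_neg h, ih]

theorem bestOf_none_iff (s : List Char) (l : List String) (t : Int) :
    bestOf s t l = none ↔
      ∀ ss ∈ l, ¬(PySem.Chars.find s ss.toList ≠ -1 ∧ PySem.Chars.find s ss.toList < t) := by
  induction l generalizing t with
  | nil => simp [bestOf]
  | cons ss rest ih =>
      simp only [bestOf, List.forall_mem_cons]
      by_cases h : PySem.Chars.find s ss.toList ≠ -1 ∧ PySem.Chars.find s ss.toList < t
      · rw [if_pos h]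
        cases hb : bestOf s (PySem.Chars.find s ss.toList) rest with
        | none => simp [h]
        | some r => simp [h]
      · rw [if_neg h, ih]
        exact ⟨fun hall => ⟨h, hall⟩, fun h2 => h2.2⟩

theorem bestOf_some_spec (s : List Char) (l : List String) (t j : Int) (ss0 : String)
    (h : bestOf s t l = some (j, ss0)) :
    PySem.Chars.find s ss0.toList = j ∧ j < t ∧ j ≠ -1 ∧
    (∀ ss ∈ l, PySem.Chars.find s ss.toList ≠ -1 → PySem.Chars.find s ss.toList < t →
       j ≤ PySem.Chars.find s ss.toList) ∧
    (∃ l1 l2, l = l1 ++ ss0 :: l2 ∧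
       ∀ ss ∈ l1, PySem.Chars.find s ss.toList = -1 ∨ j < PySem.Chars.find s ss.toList) := by
  induction l generalizing t j ss0 with
  | nil => simp [bestOf] at h
  | cons ss rest ih =>
      simp only [bestOf] at h
      by_cases hc : PySem.Chars.find s ss.toList ≠ -1 ∧ PySem.Chars.find s ss.toList < t
      · rw [if_pos hc] at h
        cases hb : bestOf s (PySem.Chars.find s ss.toList) rest with
        | some r =>
            rw [hb] at h
            obtain ⟨j', ss'⟩ := r
            simp only [Option.some.injEq, Prod.mk.injEq] at h
            obtain ⟨hj, hss⟩ := h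
            subst hj; subst hss
            obtain ⟨hfind, hlt, hne, hmin, l1, l2, heq, hbefore⟩ := ih _ _ _ hb
            refine ⟨hfind, lt_trans hlt hc.2, hne, ?_, ss :: l1, l2, by rw [heq]; rfl, ?_⟩
            · intro ss' hm hne2 hlt2
              rcases List.mem_cons.mp hm with rfl | hm
              · exact le_of_lt hlt
              · by_cases hlt3 : PySem.Chars.find s ss'.toList < PySem.Chars.find s ss.toList
                · exact hmin ss' hm hne2 hlt3
                · omega
            · intro ss' hm
              rcases List.mem_cons.mp hm with rfl | hm
              · exact Or.inr hlt
              · exact hbefore ss' hm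
        | none =>
            rw [hb] at h
            simp only [Option.some.injEq, Prod.mk.injEq] at h
            obtain ⟨hj, hss⟩ := h
            subst hj; subst hss
            rw [bestOf_none_iff] at hb
            refine ⟨rfl, hc.2, hc.1, ?_, [], rest, rfl, by simp⟩
            intro ss' hm hne2 hlt2
            rcases List.mem_cons.mp hm with rfl | hm
            · exact le_refl _
            · have := hb ss' hm
              omega
      · rw [if_neg hc] at h
        obtain ⟨hfind, hlt, hne, hmin, l1, l2, heq, hbefore⟩ := ih _ _ _ h
        refine ⟨hfind, hlt, hne, ?_, ss :: l1, l2, by rw [heq]; rfl, ?_⟩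
        · intro ss' hm hne2 hlt2
          rcases List.mem_cons.mp hm with rfl | hm
          · exact absurd ⟨hne2, hlt2⟩ hc
          · exact hmin ss' hm hne2 hlt2
        · intro ss' hm
          rcases List.mem_cons.mp hm with rfl | hm
          · by_cases hss : PySem.Chars.find s ss'.toList = -1
            · exact Or.inl hss
            · right; omega
          · exact hbefore ss' hm

-- a match at position i means find ≠ -1 and find ≤ i
theorem find_le_of_prefix_drop (s : List Char) (ss : List Char) (i : Nat)
    (h : ss <+: s.drop i) :
    PySem.Chars.find s ss ≠ -1 ∧ PySem.Chars.find s ss ≤ (i : Int) := by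
  have hin : PySem.Chars.isIn ss s = true :=
    (PySem.Chars.exists_prefix_drop_iff_isIn ss s).mp ⟨i, h⟩
  have hne : PySem.Chars.find s ss ≠ -1 :=
    (PySem.Chars.find_ne_neg_one_iff s ss).mpr ((PySem.Chars.isIn_iff_infix ss s).mp hin)
  have hlow := PySem.Chars.neg_one_le_find s ss
  refine ⟨hne, ?_⟩
  by_contra hcon
  have hlt : i < (PySem.Chars.find s ss).toNat := by omega
  exact ((PySem.Chars.find_spec (s := s) (sub := ss) (by omega)).2 i hlt) h

theorem ffsBInner_none_iff (s : List Char) (i : Nat) (l : List String) :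
    ffsBInner s i l = none ↔ ∀ ss ∈ l, ¬(ss.toList <+: s.drop i) := by
  induction l with
  | nil => simp [ffsBInner]
  | cons ss rest ih =>
      simp only [ffsBInner, List.forall_mem_cons]
      by_cases h : PySem.Chars.startswith (s.drop i) ss.toList
      · rw [if_pos h]
        simp only [reduceCtorEq, false_iff, not_and]
        intro hcon
        exact absurd ((PySem.Chars.startswith_iff _ _).mp h) hcon
      · rw [if_neg h, ih]
        have hnp : ¬(ss.toList <+: s.drop i) :=
          fun hp => h ((PySem.Chars.startswith_iff _ _).mpr hp)
        exact ⟨fun hall => ⟨hnp, hall⟩, fun h2 => h2.2⟩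

theorem ffsBScan_none (s : List Char) (l : List String) (ids : List Nat)
    (h : ∀ i ∈ ids, ffsBInner s i l = none) :
    ffsBScan s l ids = (none, none) := by
  induction ids with
  | nil => rfl
  | cons i rest ih =>
      simp only [ffsBScan, h i List.mem_cons_self]
      exact ih (fun i' hm => h i' (List.mem_cons_of_mem _ hm))

theorem ffsBScan_found (s : List Char) (l : List String) (ids1 ids2 : List Nat) (i : Nat)
    (ss : String)
    (h1 : ∀ i' ∈ ids1, ffsBInner s i' l = none)
    (h2 : ffsBInner s i l = some (ss, i)) :
    ffsBScan s l (ids1 ++ i :: ids2) = (some ss, some (i : Int)) := by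
  induction ids1 with
  | nil => simp [ffsBScan, h2]
  | cons i' rest ih =>
      simp only [List.cons_append, ffsBScan, h1 i' List.mem_cons_self]
      exact ih (fun i'' hm => h1 i'' (List.mem_cons_of_mem _ hm))

theorem ffsBInner_found (s : List Char) (i : Nat) (l1 l2 : List String) (ss0 : String)
    (h1 : ∀ ss ∈ l1, ¬(ss.toList <+: s.drop i))
    (h2 : ss0.toList <+: s.drop i) :
    ffsBInner s i (l1 ++ ss0 :: l2) = some (ss0, i) := by
  induction l1 with
  | nil =>
      simp only [List.nil_append, ffsBInner]
      rw [if_pos ((PySem.Chars.startswith_iff _ _).mpr h2)]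
  | cons ss rest ih =>
      simp only [List.cons_append, ffsBInner]
      rw [if_neg (fun h => h1 ss List.mem_cons_self ((PySem.Chars.startswith_iff _ _).mp h))]
      exact ih (fun ss' hm => h1 ss' (List.mem_cons_of_mem _ hm))

-- ===== VERDICT (by name: the statement is the Claim_ definition above) =====
theorem find_first_substr_in_str_spec : Claim_equal_find_first_substr_in_str := by
  intro str_to_find substrs _ hpre
  unfold Pre_find_first_substr_in_str at hpre
  unfold Spec_find_first_substr_in_str
  set s := str_to_find.toList with hs
  show find_first_substr_in_str str_to_find substrs = _
  unfold find_first_substr_in_str find_first_substr_in_str_alt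
  rw [← hs, foldA_char]
  cases hb : bestOf s 1000000 substrs with
  | none =>
      -- no substring is found: both sides return (none, none)
      rw [bestOf_none_iff] at hb
      simp only
      rw [ffsBScan_none]
      intro i hi
      rw [List.mem_range] at hi
      rw [ffsBInner_none_iff]
      intro ss hm hp
      obtain ⟨hne, hle⟩ := find_le_of_prefix_drop s ss.toList i hp
      exact hb ss hm ⟨hne, by omega⟩
  | some r =>
      obtain ⟨j, ss0⟩ := r
      obtain ⟨hfind, hlt, hne, hmin, l1, l2, heq, hbefore⟩ := bestOf_some_spec s substrs _ _ _ hb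
      have hlow := PySem.Chars.neg_one_le_find s ss0.toList
      have hpos : 0 ≤ j := by omega
      have hjlen : j ≤ (s.length : Int) := hfind ▸ PySem.Chars.find_le_length s ss0.toList
      have hprefix : ss0.toList <+: s.drop j.toNat := by
        have := (PySem.Chars.find_spec (s := s) (sub := ss0.toList) (by omega)).1
        rwa [hfind] at this
      have hrange : j.toNat < s.length + 1 := by omega
      have hsplit : List.range (s.length + 1) =
          List.range j.toNat ++ j.toNat ::
            List.range' (j.toNat + 1) (s.length + 1 - j.toNat - 1) := by
        rw [List.range_eq_range', List.range_eq_range', ← List.range'_succ,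
          show s.length + 1 - j.toNat - 1 + 1 = s.length + 1 - j.toNat by omega]
        have happ := @List.range'_append 0 j.toNat (s.length + 1 - j.toNat) 1
        simp only [Nat.zero_add, Nat.one_mul] at happ
        rw [happ, show j.toNat + (s.length + 1 - j.toNat) = s.length + 1 by omega]
      simp only
      rw [hsplit, ffsBScan_found s substrs _ _ j.toNat ss0, Int.toNat_of_nonneg hpos]
      · -- positions before j have no match
        intro i hi
        rw [List.mem_range] at hi
        rw [ffsBInner_none_iff]
        intro ss hm hp
        obtain ⟨hne2, hle⟩ := find_le_of_prefix_drop s ss.toList i hp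
        have : j ≤ PySem.Chars.find s ss.toList := hmin ss hm hne2 (by omega)
        omega
      · -- at position j the first matching substring is ss0
        rw [heq]
        refine ffsBInner_found s j.toNat l1 l2 ss0 ?_ hprefix
        intro ss hm hp
        obtain ⟨hne2, hle⟩ := find_le_of_prefix_drop s ss.toList j.toNat hp
        rcases hbefore ss hm with h | h
        · exact hne2 h
        · omega
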